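-- pv_equiv track=rewrite | github.com/snail-unamur/Yo-kai-watch | interviews/find_new_categories.py | getDistanceLists
-- ===== SOURCE A (Python) =====
-- def getDistanceLists(l1, l2):
--     dist = 0
--     for e in l1:
--         if(e not in l2):
--             dist += 1
--     for e in l2:
--         if(e not in l1):
--             dist += 1
--
--     return dist
-- ===== SOURCE B (Python) =====
-- def getDistanceLists(l1, l2):
--     c1 = {}
--     for e in l1:
--         c1[e] = c1.get(e, 0) + 1
--     c2 = {}
--     for e in l2:
--         c2[e] = c2.get(e, 0) + 1
--     dist = 0
--     for v, n in c1.items():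
--         if v not in c2:
--             dist += n
--     for v, n in c2.items():
--         if v not in c1:
--             dist += n
--     return dist
-- ===== Notes on version B (the rewrite author's own statement) =====
-- stated objective: faster
-- what changed: Replaces the per-element scans with membership tests against the other list by two frequency dictionaries built in one pass each, then sums the counts of the distinct keys absent from the other dictionary.
import Mathlib
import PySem

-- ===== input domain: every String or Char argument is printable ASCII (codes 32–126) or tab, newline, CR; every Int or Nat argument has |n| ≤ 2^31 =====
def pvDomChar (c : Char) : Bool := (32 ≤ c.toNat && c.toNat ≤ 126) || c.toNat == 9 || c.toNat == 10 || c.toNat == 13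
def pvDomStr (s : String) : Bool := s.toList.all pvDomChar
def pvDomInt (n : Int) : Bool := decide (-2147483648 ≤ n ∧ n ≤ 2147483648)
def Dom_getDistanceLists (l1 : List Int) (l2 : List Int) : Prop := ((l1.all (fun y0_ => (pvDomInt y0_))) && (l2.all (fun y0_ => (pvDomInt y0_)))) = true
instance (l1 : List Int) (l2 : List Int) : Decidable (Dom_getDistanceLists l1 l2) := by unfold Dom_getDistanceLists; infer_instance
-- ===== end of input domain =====

-- B replaces A's quadratic element-by-element membership scans by two frequency
-- dictionaries built in one pass each, summing the counts of keys absent from the other.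


-- ===== PORT A =====
def getDistanceLists (l1 : List Int) (l2 : List Int) : Int :=
  let dist : Int := l1.foldl (fun dist e => if e ∈ l2 then dist else dist + 1) 0
  l2.foldl (fun dist e => if e ∈ l1 then dist else dist + 1) dist

-- ===== PORT B =====
def getDistanceLists_alt (l1 : List Int) (l2 : List Int) : Int :=
  let c1 : PySem.Dict Int Int := l1.foldl (fun d e => d.insert e (d.getD e 0 + 1)) PySem.Dict.empty
  let c2 : PySem.Dict Int Int := l2.foldl (fun d e => d.insert e (d.getD e 0 + 1)) PySem.Dict.empty
  let dist : Int := c1.items.foldl (fun dist p => if c2.contains p.1 then dist else dist + p.2) 0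
  c2.items.foldl (fun dist p => if c1.contains p.1 then dist else dist + p.2) dist

-- ===== PRECONDITION & SPEC =====
def Spec_getDistanceLists (l1 : List Int) (l2 : List Int) (out : Int) : Prop := out = getDistanceLists_alt l1 l2
instance (l1 : List Int) (l2 : List Int) (out : Int) : Decidable (Spec_getDistanceLists l1 l2 out) := by unfold Spec_getDistanceLists; infer_instance

-- ===== CLAIM (what is proved, stated in full; the proofs are below) =====
def Claim_equal_getDistanceLists : Prop := ∀ (l1 : List Int) (l2 : List Int), Dom_getDistanceLists l1 l2 → Spec_getDistanceLists l1 l2 (getDistanceLists l1 l2)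

-- ===== LEMMAS AND PROOFS =====

-- A's loop counts, per occurrence, the elements of l not in `other`.
theorem foldA (l other : List Int) (init : Int) :
    l.foldl (fun dist e => if e ∈ other then dist else dist + 1) init
      = init + ((l.filter (fun e => decide (e ∉ other))).length : Int) := by
  induction l generalizing init with
  | nil => simp
  | cons x t ih =>
    by_cases hx : x ∈ other <;> (simp [hx, ih]; try ring)

-- B's loop over the items of a counter adds up the counts of keys outside `other`.
theorem foldB (ks other : List Int) (cnt : Int → Int) (init : Int) :
    (ks.map (fun k => (k, cnt k))).foldl
        (fun dist p => if p.1 ∈ other then dist else dist + p.2) init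
      = init + (ks.map (fun k => if k ∈ other then 0 else cnt k)).sum := by
  induction ks generalizing init with
  | nil => simp
  | cons x t ih =>
    by_cases hx : x ∈ other <;> (simp [hx, ih]; try ring)

theorem count_filter_eq (l : List Int) (a : Int) (p : Int → Bool) :
    (l.filter p).count a = if p a then l.count a else 0 := by
  induction l with
  | nil => simp
  | cons x t ih =>
    by_cases hax : x = a
    · subst hax
      by_cases hx : p x <;> simp [hx, ih]
    · by_cases hx : p x <;> simp [hx, ih, hax]

-- Summing counts over any duplicate-free enumeration of l's members gives the filter length.
theorem sum_counts (ks l other : List Int) (hnd : ks.Nodup)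
    (hmem : ∀ k, k ∈ ks ↔ k ∈ l) :
    (ks.map (fun k => if k ∈ other then 0 else (l.count k : Int))).sum
      = ((l.filter (fun e => decide (e ∉ other))).length : Int) := by
  have hfin : ks.toFinset = l.toFinset := by
    ext a; simp [hmem]
  rw [← List.sum_toFinset _ hnd, hfin]
  have h1 : ∑ a ∈ l.toFinset, (if a ∈ other then 0 else (l.count a : Int))
      = ((∑ a ∈ l.toFinset, (l.filter (fun e => decide (e ∉ other))).count a : ℕ) : Int) := by
    push_cast
    refine Finset.sum_congr rfl (fun a _ => ?_)
    rw [count_filter_eq]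
    by_cases ha : a ∈ other <;> simp [ha]
  rw [h1]
  congr 1
  have hsub : (l.filter (fun e => decide (e ∉ other))).toFinset ⊆ l.toFinset := by
    intro a ha; simp at ha ⊢; exact ha.1
  rw [← List.sum_toFinset_count_eq_length (l.filter (fun e => decide (e ∉ other)))]
  refine (Finset.sum_subset hsub (fun a _ ha => ?_)).symm
  rw [List.count_eq_zero]
  intro h; exact ha (List.mem_toFinset.mpr h)

-- ===== VERDICT (by name: the statement is the Claim_ definition above) =====
theorem getDistanceLists_spec : Claim_equal_getDistanceLists := by
  intro l1 l2 _
  unfold Spec_getDistanceLists getDistanceLists getDistanceLists_alt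
  simp only [PySem.Dict.foldl_insert_getD_add_one_eq_counter, PySem.Dict.items_counter]
  simp only [PySem.Dict.contains_counter, List.contains_iff_mem]
  rw [foldB, foldB, foldA, foldA]
  rw [sum_counts (PySem.Set.ofList l1) l1 l2 (PySem.Set.nodup_ofList l1)
        (fun k => PySem.Set.mem_ofList _ _),
      sum_counts (PySem.Set.ofList l2) l2 l1 (PySem.Set.nodup_ofList l2)
        (fun k => PySem.Set.mem_ofList _ _)]
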